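-- pv_equiv track=rewrite | github.com/pypi-data/pypi-mirror-403 | packages/t402/t402-1.9.1.tar.gz/t402-1.9.1/src/t402/schemes/tezos/constants.py | is_valid_operation_hash
-- ===== SOURCE A (Python) =====
-- TEZOS_OP_HASH_LENGTH = 51
--
-- BASE58_CHARS = "123456789ABCDEFGHJKLMNPQRSTUVWXYZabcdefghijkmnopqrstuvwxyz"
--
-- def is_valid_operation_hash(op_hash: str) -> bool:
--     """Validate a Tezos operation hash format.
--
--     Operation hashes start with 'o' and are 51 characters of Base58.
--
--     Args:
--         op_hash: The operation hash to validate
--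
--     Returns:
--         True if the operation hash format is valid
--     """
--     if not op_hash:
--         return False
--     if not op_hash.startswith("o"):
--         return False
--     if len(op_hash) != TEZOS_OP_HASH_LENGTH:
--         return False
--     # Check all characters are valid base58
--     for char in op_hash:
--         if char not in BASE58_CHARS:
--             return False
--     return True
-- ===== SOURCE B (Python) =====
-- BASE58_CHARS = "123456789ABCDEFGHJKLMNPQRSTUVWXYZabcdefghijkmnopqrstuvwxyz"
--
--
-- def is_valid_operation_hash(op_hash: str) -> bool:
--     """Single recursive pass over the characters with a position counter,
--     fusing the prefix, length and alphabet checks; the scan aborts as soon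
--     as the 51-character budget is exceeded."""
--     def scan(chars, i):
--         if not chars:
--             return i == 51
--         if i == 51:
--             return False
--         c = chars[0]
--         if i == 0:
--             if c != "o":
--                 return False
--         elif c not in BASE58_CHARS:
--             return False
--         return scan(chars[1:], i + 1)
--
--     if not op_hash:
--         return False
--     return scan(list(op_hash), 0)
-- ===== Notes on version B (the rewrite author's own statement) =====
-- stated objective: alternative
-- what changed: Replaces A's staged guard chain (prefix check, length check, then a separate membership loop over the whole string) by one recursive position-indexed scan that fuses all three checks into a single pass and cuts off once the 51-character budget is exceeded.
import Mathlib
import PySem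

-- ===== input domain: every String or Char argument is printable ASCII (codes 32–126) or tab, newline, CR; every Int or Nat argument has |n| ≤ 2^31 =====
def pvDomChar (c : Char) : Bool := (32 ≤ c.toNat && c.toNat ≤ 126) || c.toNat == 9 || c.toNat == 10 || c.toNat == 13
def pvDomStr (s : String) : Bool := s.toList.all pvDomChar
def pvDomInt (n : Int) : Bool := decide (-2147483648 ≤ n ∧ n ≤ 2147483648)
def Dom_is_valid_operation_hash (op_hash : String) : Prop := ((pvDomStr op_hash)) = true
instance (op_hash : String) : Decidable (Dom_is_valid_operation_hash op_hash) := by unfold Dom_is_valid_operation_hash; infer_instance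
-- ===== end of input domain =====

-- B replaces A's staged guards plus separate membership loop by one recursive
-- position-indexed scan fusing all checks (objective: alternative).

-- ===== PORT A =====
def pvBase58 : List Char := "123456789ABCDEFGHJKLMNPQRSTUVWXYZabcdefghijkmnopqrstuvwxyz".toList

-- 'for char in op_hash: if char not in BASE58_CHARS: return False' — single-character
-- 'in' on a string is exactly list membership of the character, ported as contains
def pvCheckChars : List Char → Bool
  | [] => true
  | c :: rest => if !(pvBase58.contains c) then false else pvCheckChars rest

def is_valid_operation_hash (op_hash : String) : Bool :=
  if PySem.Str.len op_hash == 0 then false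
  else if !(PySem.Str.startswith op_hash "o") then false
  else if PySem.Str.len op_hash ≠ 51 then false
  else pvCheckChars op_hash.toList

-- ===== PORT B =====
-- Source B's inner 'scan(chars, i)': structural recursion on the character list
def pvScan : List Char → Int → Bool
  | [], i => i == 51
  | c :: rest, i =>
    if i == 51 then false
    else if i == 0 then
      if c ≠ 'o' then false else pvScan rest (i + 1)
    else if !(pvBase58.contains c) then false
    else pvScan rest (i + 1)

def is_valid_operation_hash_alt (op_hash : String) : Bool :=
  if PySem.Str.len op_hash == 0 then false
  else pvScan op_hash.toList 0

-- ===== PRECONDITION & SPEC =====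
def Spec_is_valid_operation_hash (op_hash : String) (out : Bool) : Prop := out = is_valid_operation_hash_alt op_hash
instance (op_hash : String) (out : Bool) : Decidable (Spec_is_valid_operation_hash op_hash out) := by unfold Spec_is_valid_operation_hash; infer_instance

-- ===== CLAIM (what is proved, stated in full; the proofs are below) =====
def Claim_equal_is_valid_operation_hash : Prop := ∀ (op_hash : String), Dom_is_valid_operation_hash op_hash → Spec_is_valid_operation_hash op_hash (is_valid_operation_hash op_hash)

-- ===== LEMMAS AND PROOFS =====

theorem pvCheckChars_eq_all (l : List Char) :
    pvCheckChars l = l.all (fun c => pvBase58.contains c) := by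
  induction l with
  | nil => rfl
  | cons c rest ih =>
    by_cases h : pvBase58.contains c <;> simp [pvCheckChars, ih]

-- once past position 0, the scan checks exactly 'right length and all chars base58'
theorem pvScan_char (l : List Char) : ∀ i : Int, 1 ≤ i →
    pvScan l i = ((i + (l.length : Int) == 51) && l.all (fun c => pvBase58.contains c)) := by
  induction l with
  | nil => intro i _; simp [pvScan]
  | cons c rest ih =>
    intro i hi
    by_cases h51 : i = 51
    · subst h51
      have hfalse : (((51 : Int) + ((c :: rest).length : Int)) == 51) = false := by
        rw [beq_eq_false_iff_ne]; simp; omega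
      rw [show pvScan (c :: rest) 51 = false from by simp [pvScan]]
      rw [hfalse, Bool.false_and]
    · have h51b : (i == 51) = false := by simp [h51]
      have h0b : (i == 0) = false := by simp; omega
      rw [show pvScan (c :: rest) i
            = (if (!pvBase58.contains c) = true then false else pvScan rest (i + 1)) from by
          simp [pvScan, h51b, h0b]]
      rw [ih (i + 1) (by omega)]
      have harith : (((i + 1) + (rest.length : Int)) == 51)
          = ((i + ((c :: rest).length : Int)) == 51) := by
        have : (i + 1) + (rest.length : Int) = i + ((c :: rest).length : Int) := by
          simp [List.length_cons]; ring
        rw [this]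
      cases hc : pvBase58.contains c
      · have hc' : c ∉ pvBase58 := by simpa using hc
        simp [hc']
      · have hc' : c ∈ pvBase58 := by simpa using hc
        simp [harith, hc']

-- ===== VERDICT (by name: the statement is the Claim_ definition above) =====
theorem is_valid_operation_hash_spec : Claim_equal_is_valid_operation_hash := by
  intro s _
  unfold Spec_is_valid_operation_hash is_valid_operation_hash is_valid_operation_hash_alt
  cases hl : s.toList with
  | nil => simp [PySem.Str.len_eq, hl]
  | cons c rest =>
    simp only [PySem.Str.len_eq, PySem.Str.startswith_eq, hl]
    rw [pvCheckChars_eq_all]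
    have hne : ¬ ((((c :: rest).length : Int)) == 0) = true := by
      simp only [beq_iff_eq, List.length_cons]; push_cast; omega
    rw [if_neg hne, if_neg hne]
    rw [show pvScan (c :: rest) 0 = (if c ≠ 'o' then false else pvScan rest 1) from by
      norm_num [pvScan]]
    rw [pvScan_char rest 1 (by omega)]
    by_cases hc : c = 'o'
    · subst hc
      rw [if_neg (show ¬ ('o' ≠ 'o') by simp)]
      rw [if_neg (show ¬ (!PySem.Chars.startswith ('o' :: rest) "o".toList) = true by
        simp [PySem.Chars.startswith, List.isPrefixOf])]
      by_cases hlen : rest.length = 50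
      · rw [if_neg (show ¬ (((('o' :: rest).length : Int)) ≠ 51) by simp [hlen])]
        have h1 : (((1 : Int) + (rest.length : Int)) == 51) = true := by simp [hlen]
        rw [h1, Bool.true_and, List.all_cons,
          show (pvBase58.contains 'o') = true from by decide, Bool.true_and]
      · rw [if_pos (show (((('o' :: rest).length : Int)) ≠ 51) by
          simp only [List.length_cons]; push_cast; omega)]
        have h1 : (((1 : Int) + (rest.length : Int)) == 51) = false := by
          rw [beq_eq_false_iff_ne]; push_cast; omega
        rw [h1, Bool.false_and]
    · rw [if_pos (show (!PySem.Chars.startswith (c :: rest) "o".toList) = true by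
        simp [PySem.Chars.startswith, List.isPrefixOf]
        exact fun h => hc h.symm)]
      rw [if_pos hc]
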